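-- pv_equiv track=rewrite | github.com/linhdvu14/cp-sols | sols/CodeForces/2008_d3/D_Sakurako_s_Hobby.py | solve
-- ===== SOURCE A (Python) =====
-- def solve(N, P, S):
--     vis = [0] * N
--     res = [0] * N
--
--     for u in range(N):
--         path = []
--         cnt = 0
--         while not vis[u]:
--             path.append(u)
--             vis[u] = 1
--             cnt += S[u] == '0'
--             u = P[u] - 1
--         for u in path: res[u] = cnt
--
--     return res
-- ===== SOURCE B (Python) =====
-- def solve(N, P, S):
--     # Brute force: each node independently walks its own cycle once and counts blacks.
--     # No shared visited state, no path writeback; valid on the problem's domain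
--     # (P a permutation of 1..N).
--     res = []
--     for u in range(N):
--         c = int(S[u] == '0')
--         v = P[u] - 1
--         while v != u:
--             c += S[v] == '0'
--             v = P[v] - 1
--         res.append(c)
--     return res
-- ===== Notes on version B (the rewrite author's own statement) =====
-- stated objective: simpler
-- what changed: B drops the visited array, the path list and the writeback entirely: each node independently walks its own cycle once and counts blacks, a stateless per-node brute force (O(n^2) instead of A's shared-state O(n)); Pre_ restricts to the problem's natural domain where P's first N entries are a permutation of 1..N, since B's stateless walk only terminates on permutations.
-- outside the precondition, e.g. on solve(2, [1, 1], '00'): A returns [1, 1], B does not finish within the time limit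
import Mathlib
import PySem

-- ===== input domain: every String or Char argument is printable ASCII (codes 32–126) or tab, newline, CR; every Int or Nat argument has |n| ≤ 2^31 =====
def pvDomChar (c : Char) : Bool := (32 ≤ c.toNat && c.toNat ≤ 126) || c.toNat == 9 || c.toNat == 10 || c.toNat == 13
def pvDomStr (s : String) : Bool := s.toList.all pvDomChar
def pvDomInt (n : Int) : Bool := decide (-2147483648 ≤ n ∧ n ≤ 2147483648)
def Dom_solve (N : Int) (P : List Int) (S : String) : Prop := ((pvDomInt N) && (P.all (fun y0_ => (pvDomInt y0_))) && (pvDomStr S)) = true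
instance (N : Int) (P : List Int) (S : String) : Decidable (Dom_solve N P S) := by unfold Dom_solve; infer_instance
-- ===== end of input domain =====

-- B drops A's shared visited array, path list and writeback: each node independently
-- walks its own cycle once and counts blacks (stateless per-node brute force; simpler,
-- not faster — O(n^2) vs A's O(n)).

-- ===== PORT A =====
-- the inner 'while not vis[u]' loop of A; fuel makes it total (each step marks a
-- fresh node, so fuel N+1 is never exhausted inside Pre_)
def solveWalkA (P : List Int) (S : List Char) : Nat → List Int → List Int → Int → Int → List Int × List Int × Int
  | 0, vis, path, cnt, _ => (vis, path, cnt)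
  | fuel+1, vis, path, cnt, u =>
      if PySem.List.pyGetD vis u 0 = 0 then
        solveWalkA P S fuel (PySem.List.pySetD vis u 1) (path ++ [u])
          (cnt + (if PySem.List.pyGetD S u ' ' = '0' then 1 else 0))
          (PySem.List.pyGetD P u 0 - 1)
      else (vis, path, cnt)

def solve (N : Int) (P : List Int) (S : String) : List Int :=
  let st := (PySem.List.pyRange 0 N 1).foldl (fun st u =>
      let w := solveWalkA P S.toList (N.toNat + 1) st.1 [] 0 u
      (w.1, w.2.1.foldl (fun r v => PySem.List.pySetD r v w.2.2) st.2))
    (List.replicate N.toNat 0, List.replicate N.toNat 0)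
  st.2

-- ===== PORT B =====
-- the inner 'while v != u' loop of B; fuel N+1 is never exhausted inside Pre_
-- (v returns to u within the cycle length ≤ N)
def solveWalkB (P : List Int) (S : List Char) (u : Int) : Nat → Int → Int → Int
  | 0, c, _ => c
  | fuel+1, c, v =>
      if v = u then c
      else solveWalkB P S u fuel
        (c + (if PySem.List.pyGetD S v ' ' = '0' then 1 else 0))
        (PySem.List.pyGetD P v 0 - 1)

def solve_alt (N : Int) (P : List Int) (S : String) : List Int :=
  (PySem.List.pyRange 0 N 1).map (fun u =>
    solveWalkB P S.toList u (N.toNat + 1)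
      (if PySem.List.pyGetD S.toList u ' ' = '0' then 1 else 0)
      (PySem.List.pyGetD P u 0 - 1))

-- ===== PRECONDITION & SPEC =====
-- Pre_ restricts to the problem's natural domain: the first N entries of P form a
-- permutation of 1..N (with P and S at least N long), or trivially N < 0; excluded
-- are inputs where A raises IndexError and in-range non-permutation inputs, on which
-- A returns tail-dependent segment counts while B's stateless cycle walk diverges.
def Pre_solve (N : Int) (P : List Int) (S : String) : Prop :=
  N < 0 ∨
  (0 ≤ N ∧ N ≤ (P.length : Int) ∧ N ≤ (S.toList.length : Int) ∧
    (∀ p ∈ P.take N.toNat, 1 ≤ p ∧ p ≤ N) ∧ (P.take N.toNat).Nodup)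
instance (N : Int) (P : List Int) (S : String) : Decidable (Pre_solve N P S) := by
  unfold Pre_solve; infer_instance

def pvWitness_solve : Int × List Int × String := (3, [2, 3, 1], "010")

def Spec_solve (N : Int) (P : List Int) (S : String) (out : List Int) : Prop := out = solve_alt N P S
instance (N : Int) (P : List Int) (S : String) (out : List Int) : Decidable (Spec_solve N P S out) := by unfold Spec_solve; infer_instance

-- ===== CLAIM (what is proved, stated in full; the proofs are below) =====
def Claim_equal_solve : Prop := ∀ (N : Int) (P : List Int) (S : String), Dom_solve N P S → Pre_solve N P S → Spec_solve N P S (solve N P S)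

-- ===== LEMMAS AND PROOFS =====

-- the successor function of the permutation, extended by the identity outside [0,n)
def pvF (P : List Int) (n : Nat) (i : Nat) : Nat :=
  if i < n then (P.getD i 0 - 1).toNat else i

-- the length of the cycle through u (least positive period)
noncomputable def pvPer (P : List Int) (n u : Nat) : Nat :=
  sInf {m | 0 < m ∧ (pvF P n)^[m] u = u}

-- black indicator
def pvZ (S : List Char) (i : Nat) : Int := if S.getD i ' ' = '0' then 1 else 0

-- the cycle through u as a finite set
noncomputable def pvOrb (P : List Int) (n u : Nat) : Finset Nat :=
  Finset.image (fun k => (pvF P n)^[k] u) (Finset.range (pvPer P n u))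

-- black count of the cycle through u
noncomputable def pvW (P : List Int) (S : List Char) (n u : Nat) : Int :=
  ∑ i ∈ pvOrb P n u, pvZ S i

-- write value x at positions ks
def pvSetAll (x : Int) (ks : List Nat) (l : List Int) : List Int :=
  ks.foldl (fun cc k => cc.set k x) l

lemma pvSetAll_length (x : Int) (ks : List Nat) (l : List Int) :
    (pvSetAll x ks l).length = l.length := by
  induction ks generalizing l with
  | nil => rfl
  | cons k ks ih => rw [show pvSetAll x (k :: ks) l = pvSetAll x ks (l.set k x) from rfl, ih]; simp

lemma getD_set_eq_ite (l : List Int) (k i : Nat) (a d : Int) (_hk : k < l.length) (hi : i < l.length) :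
    (l.set k a).getD i d = if i = k then a else l.getD i d := by
  rw [List.getD_eq_getElem _ _ (by simpa using hi), List.getD_eq_getElem _ _ hi]
  simp [List.getElem_set]
  split_ifs with h1 h2 h2 <;> first | rfl | (exfalso; omega)

lemma pvSetAll_getD (x : Int) (ks : List Nat) (l : List Int) (i : Nat)
    (hi : i < l.length) (hks : ∀ k ∈ ks, k < l.length) :
    (pvSetAll x ks l).getD i 0 = if i ∈ ks then x else l.getD i 0 := by
  induction ks generalizing l with
  | nil => simp [pvSetAll]
  | cons k ks ih =>
      rw [show pvSetAll x (k :: ks) l = pvSetAll x ks (l.set k x) from rfl,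
        ih (l.set k x) (by simpa using hi) (fun w hw => by simpa using hks w (by simp [hw]))]
      rw [getD_set_eq_ite l k i x 0 (hks k (by simp)) hi]
      by_cases hmem : i ∈ ks
      · simp [hmem]
      · by_cases hik : i = k
        · have hm : i ∈ k :: ks := by simp [hik]
          rw [if_neg hmem, if_pos hik, if_pos hm]
        · simp [hmem, hik]

lemma pvF_lt (P : List Int) (n : Nat)
    (hbnd : ∀ i : Nat, i < n → 1 ≤ P.getD i 0 ∧ P.getD i 0 ≤ (n : Int)) :
    ∀ i : Nat, i < n → pvF P n i < n := by
  intro i hi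
  have := hbnd i hi
  unfold pvF
  rw [if_pos hi]
  omega

lemma pvF_inj (P : List Int) (n : Nat)
    (hbnd : ∀ i : Nat, i < n → 1 ≤ P.getD i 0 ∧ P.getD i 0 ≤ (n : Int))
    (hinj : ∀ i j : Nat, i < n → j < n → P.getD i 0 = P.getD j 0 → i = j) :
    Function.Injective (pvF P n) := by
  intro i j h
  unfold pvF at h
  by_cases hi : i < n <;> by_cases hj : j < n
  · rw [if_pos hi, if_pos hj] at h
    have hbi := hbnd i hi
    have hbj := hbnd j hj
    exact hinj i j hi hj (by omega)
  · rw [if_pos hi, if_neg hj] at h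
    have := hbnd i hi
    omega
  · rw [if_neg hi, if_pos hj] at h
    have := hbnd j hj
    omega
  · rw [if_neg hi, if_neg hj] at h
    exact h

lemma pvF_iterate_lt (P : List Int) (n : Nat)
    (hbnd : ∀ i : Nat, i < n → 1 ≤ P.getD i 0 ∧ P.getD i 0 ≤ (n : Int))
    (u : Nat) (hu : u < n) : ∀ k, (pvF P n)^[k] u < n := by
  intro k
  induction k with
  | zero => simpa
  | succ k ih =>
      rw [Function.iterate_succ_apply']
      exact pvF_lt P n hbnd _ ih

lemma pvPer_exists (P : List Int) (n : Nat)
    (hbnd : ∀ i : Nat, i < n → 1 ≤ P.getD i 0 ∧ P.getD i 0 ≤ (n : Int))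
    (hinj : ∀ i j : Nat, i < n → j < n → P.getD i 0 = P.getD j 0 → i = j)
    (u : Nat) (hu : u < n) :
    ∃ m, m ∈ {m | 0 < m ∧ (pvF P n)^[m] u = u} ∧ m ≤ n := by
  have hmap : ∀ k ∈ Finset.range (n + 1), (pvF P n)^[k] u ∈ Finset.range n := by
    intro k _
    exact Finset.mem_range.mpr (pvF_iterate_lt P n hbnd u hu k)
  obtain ⟨a, ha, b, hb, hne, heq⟩ :=
    Finset.exists_ne_map_eq_of_card_lt_of_maps_to (by simp) hmap
  rcases Nat.lt_or_ge a b with hab | hab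
  · refine ⟨b - a, ⟨by omega, ?_⟩, by simp at hb; omega⟩
    have h1 : (pvF P n)^[a] ((pvF P n)^[b - a] u) = (pvF P n)^[a] u := by
      rw [← Function.iterate_add_apply, show a + (b - a) = b from by omega, heq]
    exact (Function.Injective.iterate (pvF_inj P n hbnd hinj) a) h1
  · have hab' : b < a := by omega
    refine ⟨a - b, ⟨by omega, ?_⟩, by simp at ha; omega⟩
    have h1 : (pvF P n)^[b] ((pvF P n)^[a - b] u) = (pvF P n)^[b] u := by
      rw [← Function.iterate_add_apply, show b + (a - b) = a from by omega, heq]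
    exact (Function.Injective.iterate (pvF_inj P n hbnd hinj) b) h1

lemma pvPer_spec (P : List Int) (n : Nat)
    (hbnd : ∀ i : Nat, i < n → 1 ≤ P.getD i 0 ∧ P.getD i 0 ≤ (n : Int))
    (hinj : ∀ i j : Nat, i < n → j < n → P.getD i 0 = P.getD j 0 → i = j)
    (u : Nat) (hu : u < n) :
    0 < pvPer P n u ∧ (pvF P n)^[pvPer P n u] u = u ∧ pvPer P n u ≤ n := by
  obtain ⟨m, hm, hmn⟩ := pvPer_exists P n hbnd hinj u hu
  have hmem := Nat.sInf_mem ⟨m, hm⟩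
  have hle : pvPer P n u ≤ m := Nat.sInf_le hm
  exact ⟨hmem.1, hmem.2, le_trans hle hmn⟩

lemma pvPer_min (P : List Int) (n u k : Nat) (hk : 0 < k) (hlt : k < pvPer P n u) :
    (pvF P n)^[k] u ≠ u := by
  intro h
  have h2 : pvPer P n u ≤ k := by
    unfold pvPer
    exact Nat.sInf_le ⟨hk, h⟩
  omega

-- iterates below the period are pairwise distinct
lemma pvIter_distinct (P : List Int) (n : Nat)
    (hbnd : ∀ i : Nat, i < n → 1 ≤ P.getD i 0 ∧ P.getD i 0 ≤ (n : Int))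
    (hinj : ∀ i j : Nat, i < n → j < n → P.getD i 0 = P.getD j 0 → i = j)
    (u : Nat) (a b : Nat) (hab : a < b) (hb : b < pvPer P n u) :
    (pvF P n)^[a] u ≠ (pvF P n)^[b] u := by
  intro h
  have h1 : (pvF P n)^[a] ((pvF P n)^[b - a] u) = (pvF P n)^[a] u := by
    rw [← Function.iterate_add_apply, show a + (b - a) = b from by omega, h]
  have h2 := (Function.Injective.iterate (pvF_inj P n hbnd hinj) a) h1
  exact pvPer_min P n u (b - a) (by omega) (by omega) h2

lemma pvPer_succ (P : List Int) (n : Nat)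
    (hbnd : ∀ i : Nat, i < n → 1 ≤ P.getD i 0 ∧ P.getD i 0 ≤ (n : Int))
    (hinj : ∀ i j : Nat, i < n → j < n → P.getD i 0 = P.getD j 0 → i = j)
    (u : Nat) (hu : u < n) :
    pvPer P n (pvF P n u) = pvPer P n u := by
  obtain ⟨hp, hper, _⟩ := pvPer_spec P n hbnd hinj u hu
  have hfu : pvF P n u < n := pvF_lt P n hbnd u hu
  obtain ⟨hp', hper', _⟩ := pvPer_spec P n hbnd hinj (pvF P n u) hfu
  have h1 : pvPer P n (pvF P n u) ≤ pvPer P n u := by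
    apply Nat.sInf_le
    refine ⟨hp, ?_⟩
    rw [← Function.iterate_succ_apply, Function.iterate_succ_apply', hper]
  have h2 : pvPer P n u ≤ pvPer P n (pvF P n u) := by
    apply Nat.sInf_le
    refine ⟨hp', ?_⟩
    have : (pvF P n)^[pvPer P n (pvF P n u)] (pvF P n u) = pvF P n u := hper'
    rw [← Function.iterate_succ_apply, Function.iterate_succ_apply'] at this
    exact pvF_inj P n hbnd hinj this
  omega

lemma pvOrb_mem_iff (P : List Int) (n u x : Nat) :
    x ∈ pvOrb P n u ↔ ∃ k, k < pvPer P n u ∧ (pvF P n)^[k] u = x := by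
  unfold pvOrb
  simp [Finset.mem_image]

lemma pvOrb_succ (P : List Int) (n : Nat)
    (hbnd : ∀ i : Nat, i < n → 1 ≤ P.getD i 0 ∧ P.getD i 0 ≤ (n : Int))
    (hinj : ∀ i j : Nat, i < n → j < n → P.getD i 0 = P.getD j 0 → i = j)
    (u : Nat) (hu : u < n) :
    pvOrb P n (pvF P n u) = pvOrb P n u := by
  obtain ⟨hp, hper, _⟩ := pvPer_spec P n hbnd hinj u hu
  have hpeq := pvPer_succ P n hbnd hinj u hu
  apply Finset.ext
  intro x
  rw [pvOrb_mem_iff, pvOrb_mem_iff, hpeq]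
  constructor
  · rintro ⟨k, hk, rfl⟩
    have he : (pvF P n)^[k] (pvF P n u) = (pvF P n)^[k + 1] u :=
      (Function.iterate_succ_apply _ k u).symm
    by_cases hk1 : k + 1 < pvPer P n u
    · exact ⟨k + 1, hk1, by rw [he]⟩
    · have hk2 : k + 1 = pvPer P n u := by omega
      exact ⟨0, hp, by simp [he, hk2, hper]⟩
  · rintro ⟨k, hk, rfl⟩
    by_cases hk0 : 0 < k
    · have he : (pvF P n)^[k - 1] (pvF P n u) = (pvF P n)^[k] u := by
        rw [← Function.iterate_succ_apply]
        congr 1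
        omega
      exact ⟨k - 1, by omega, he⟩
    · have hk2 : k = 0 := by omega
      subst hk2
      have he : (pvF P n)^[pvPer P n u - 1] (pvF P n u) = (pvF P n)^[pvPer P n u] u := by
        rw [← Function.iterate_succ_apply]
        congr 1
        omega
      exact ⟨pvPer P n u - 1, by omega, by simp [he, hper]⟩

lemma pvOrb_self_mem (P : List Int) (n : Nat)
    (hbnd : ∀ i : Nat, i < n → 1 ≤ P.getD i 0 ∧ P.getD i 0 ≤ (n : Int))
    (hinj : ∀ i j : Nat, i < n → j < n → P.getD i 0 = P.getD j 0 → i = j)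
    (u : Nat) (hu : u < n) : u ∈ pvOrb P n u := by
  obtain ⟨hp, _, _⟩ := pvPer_spec P n hbnd hinj u hu
  exact (pvOrb_mem_iff P n u u).mpr ⟨0, hp, rfl⟩

lemma pvOrb_iterate (P : List Int) (n : Nat)
    (hbnd : ∀ i : Nat, i < n → 1 ≤ P.getD i 0 ∧ P.getD i 0 ≤ (n : Int))
    (hinj : ∀ i j : Nat, i < n → j < n → P.getD i 0 = P.getD j 0 → i = j)
    (u : Nat) (hu : u < n) (k : Nat) :
    pvOrb P n ((pvF P n)^[k] u) = pvOrb P n u := by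
  induction k with
  | zero => rfl
  | succ k ih =>
      rw [Function.iterate_succ_apply',
        pvOrb_succ P n hbnd hinj _ (pvF_iterate_lt P n hbnd u hu k), ih]

lemma pvOrb_eq_of_mem (P : List Int) (n : Nat)
    (hbnd : ∀ i : Nat, i < n → 1 ≤ P.getD i 0 ∧ P.getD i 0 ≤ (n : Int))
    (hinj : ∀ i j : Nat, i < n → j < n → P.getD i 0 = P.getD j 0 → i = j)
    (u x : Nat) (hu : u < n) (hx : x ∈ pvOrb P n u) :
    pvOrb P n x = pvOrb P n u := by
  obtain ⟨k, _, rfl⟩ := (pvOrb_mem_iff P n u x).mp hx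
  exact pvOrb_iterate P n hbnd hinj u hu k

-- the cycle sum as a sum over the first per iterates
lemma pvW_eq_range_sum (P : List Int) (S : List Char) (n : Nat)
    (hbnd : ∀ i : Nat, i < n → 1 ≤ P.getD i 0 ∧ P.getD i 0 ≤ (n : Int))
    (hinj : ∀ i j : Nat, i < n → j < n → P.getD i 0 = P.getD j 0 → i = j)
    (u : Nat) (_hu : u < n) :
    pvW P S n u = ∑ k ∈ Finset.range (pvPer P n u), pvZ S ((pvF P n)^[k] u) := by
  unfold pvW pvOrb
  rw [Finset.sum_image]
  intro a ha b hb hab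
  by_contra hne
  rcases Nat.lt_or_ge a b with h | h
  · exact pvIter_distinct P n hbnd hinj u a b h (Finset.mem_range.mp hb) hab
  · exact pvIter_distinct P n hbnd hinj u b a (by omega) (Finset.mem_range.mp ha) hab.symm

-- B's inner while loop walks the tail of the cycle and sums the blacks it passes
lemma walkB_spec (P : List Int) (S : List Char) (n : Nat)
    (hbnd : ∀ i : Nat, i < n → 1 ≤ P.getD i 0 ∧ P.getD i 0 ≤ (n : Int))
    (hinj : ∀ i j : Nat, i < n → j < n → P.getD i 0 = P.getD j 0 → i = j)
    (u : Nat) (hu : u < n) :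
    ∀ t j c fuel, j + t = pvPer P n u → 1 ≤ j → t + 1 ≤ fuel →
      solveWalkB P S ((u : Nat) : Int) fuel c (((pvF P n)^[j] u : Nat) : Int)
        = c + ∑ k ∈ Finset.Ico j (pvPer P n u), pvZ S ((pvF P n)^[k] u) := by
  intro t
  induction t with
  | zero =>
      intro j c fuel hjt hj hfuel
      obtain ⟨hp, hper, hpn⟩ := pvPer_spec P n hbnd hinj u hu
      obtain ⟨fl, rfl⟩ : ∃ fl, fuel = fl + 1 := ⟨fuel - 1, by omega⟩
      have hj' : j = pvPer P n u := by omega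
      rw [hj', hper, solveWalkB, if_pos rfl, Finset.Ico_self, Finset.sum_empty, add_zero]
  | succ t ih =>
      intro j c fuel hjt hj hfuel
      obtain ⟨hp, hper, hpn⟩ := pvPer_spec P n hbnd hinj u hu
      obtain ⟨fl, rfl⟩ : ∃ fl, fuel = fl + 1 := ⟨fuel - 1, by omega⟩
      have hjm : j < pvPer P n u := by omega
      set x : Nat := (pvF P n)^[j] u with hx
      have hxn : x < n := pvF_iterate_lt P n hbnd u hu j
      have hne : ((x : Nat) : Int) ≠ ((u : Nat) : Int) := by
        have := pvPer_min P n u j hj hjm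
        rw [← hx] at this
        exact_mod_cast fun h => this (by exact_mod_cast h)
      rw [solveWalkB, if_neg hne]
      have hS : PySem.List.pyGetD S ((x : Nat) : Int) ' ' = S.getD x ' ' :=
        PySem.List.pyGetD_natCast S x ' '
      have hP : PySem.List.pyGetD P ((x : Nat) : Int) 0 - 1 = (((pvF P n)^[j+1] u : Nat) : Int) := by
        rw [PySem.List.pyGetD_natCast]
        have hb := hbnd x hxn
        rw [Function.iterate_succ_apply', ← hx]
        unfold pvF
        rw [if_pos hxn]
        omega
      rw [hS, hP, ih (j + 1) _ fl (by omega) (by omega) (by omega)]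
      rw [Finset.sum_eq_sum_Ico_succ_bot hjm]
      unfold pvZ
      rw [← hx]
      ring

-- B's value at u is the black count of u's cycle
lemma solve_alt_elem (P : List Int) (S : List Char) (n : Nat)
    (hbnd : ∀ i : Nat, i < n → 1 ≤ P.getD i 0 ∧ P.getD i 0 ≤ (n : Int))
    (hinj : ∀ i j : Nat, i < n → j < n → P.getD i 0 = P.getD j 0 → i = j)
    (u : Nat) (hu : u < n) :
    solveWalkB P S ((u : Nat) : Int) (n + 1) (pvZ S u) (PySem.List.pyGetD P ((u : Nat) : Int) 0 - 1)
      = pvW P S n u := by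
  obtain ⟨hp, hper, hpn⟩ := pvPer_spec P n hbnd hinj u hu
  have hP : PySem.List.pyGetD P ((u : Nat) : Int) 0 - 1 = (((pvF P n)^[1] u : Nat) : Int) := by
    rw [PySem.List.pyGetD_natCast]
    have hb := hbnd u hu
    rw [Function.iterate_one]
    unfold pvF
    rw [if_pos hu]
    omega
  rw [hP, walkB_spec P S n hbnd hinj u hu (pvPer P n u - 1) 1 _ (n + 1) (by omega) le_rfl (by omega)]
  rw [pvW_eq_range_sum P S n hbnd hinj u hu, Finset.range_eq_Ico,
    Finset.sum_eq_sum_Ico_succ_bot hp, Function.iterate_zero_apply]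

-- visitedness propagates forward along pvF
lemma vis_closed_iterate (P : List Int) (n : Nat)
    (hbnd : ∀ i : Nat, i < n → 1 ≤ P.getD i 0 ∧ P.getD i 0 ≤ (n : Int))
    (vis : List Int)
    (hcl : ∀ i, i < n → vis.getD i 0 ≠ 0 → vis.getD (pvF P n i) 0 ≠ 0) :
    ∀ t x, x < n → vis.getD x 0 ≠ 0 → vis.getD ((pvF P n)^[t] x) 0 ≠ 0 := by
  intro t
  induction t with
  | zero => intro x _ h; simpa
  | succ t ih =>
      intro x hx h
      rw [Function.iterate_succ_apply']
      exact hcl _ (pvF_iterate_lt P n hbnd x hx t) (ih x hx h)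

-- if the start of a cycle is unvisited and vis is forward-closed, the whole cycle is unvisited
lemma orbit_unvisited (P : List Int) (n : Nat)
    (hbnd : ∀ i : Nat, i < n → 1 ≤ P.getD i 0 ∧ P.getD i 0 ≤ (n : Int))
    (hinj : ∀ i j : Nat, i < n → j < n → P.getD i 0 = P.getD j 0 → i = j)
    (vis : List Int)
    (hcl : ∀ i, i < n → vis.getD i 0 ≠ 0 → vis.getD (pvF P n i) 0 ≠ 0)
    (u : Nat) (hu : u < n) (h0 : vis.getD u 0 = 0) :
    ∀ k, k < pvPer P n u → vis.getD ((pvF P n)^[k] u) 0 = 0 := by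
  obtain ⟨hp, hper, hpn⟩ := pvPer_spec P n hbnd hinj u hu
  intro k hk
  by_contra h
  have h2 := vis_closed_iterate P n hbnd vis hcl (pvPer P n u - k) ((pvF P n)^[k] u)
    (pvF_iterate_lt P n hbnd u hu k) h
  rw [← Function.iterate_add_apply, show pvPer P n u - k + k = pvPer P n u from by omega,
    hper] at h2
  exact h2 h0

-- A's inner walk from position j of a fresh cycle: marks the rest of the cycle,
-- appends it to the path, and adds its black count
lemma walkA_spec (P : List Int) (S : List Char) (n : Nat)
    (hbnd : ∀ i : Nat, i < n → 1 ≤ P.getD i 0 ∧ P.getD i 0 ≤ (n : Int))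
    (hinj : ∀ i j : Nat, i < n → j < n → P.getD i 0 = P.getD j 0 → i = j)
    (u : Nat) (hu : u < n) :
    ∀ t j vis path cnt fuel, j + t = pvPer P n u → t + 1 ≤ fuel → vis.length = n →
      (∀ k, j ≤ k → k < pvPer P n u → vis.getD ((pvF P n)^[k] u) 0 = 0) →
      (1 ≤ j → vis.getD u 0 ≠ 0) →
      solveWalkA P S fuel vis path cnt (((pvF P n)^[j] u : Nat) : Int)
        = (pvSetAll 1 ((List.range' j (pvPer P n u - j)).map (fun k => (pvF P n)^[k] u)) vis,
           path ++ (List.range' j (pvPer P n u - j)).map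
             (fun k => (((pvF P n)^[k] u : Nat) : Int)),
           cnt + ∑ k ∈ Finset.Ico j (pvPer P n u), pvZ S ((pvF P n)^[k] u)) := by
  intro t
  induction t with
  | zero =>
      intro j vis path cnt fuel hjt hfuel hlen hfresh hstop
      obtain ⟨hp, hper, hpn⟩ := pvPer_spec P n hbnd hinj u hu
      obtain ⟨fl, rfl⟩ : ∃ fl, fuel = fl + 1 := ⟨fuel - 1, by omega⟩
      have hj' : j = pvPer P n u := by omega
      subst hj'
      rw [hper, solveWalkA, if_neg]
      · simp [pvSetAll]
      · rw [PySem.List.pyGetD_natCast]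
        exact hstop (by omega)
  | succ t ih =>
      intro j vis path cnt fuel hjt hfuel hlen hfresh hstop
      obtain ⟨hp, hper, hpn⟩ := pvPer_spec P n hbnd hinj u hu
      obtain ⟨fl, rfl⟩ : ∃ fl, fuel = fl + 1 := ⟨fuel - 1, by omega⟩
      have hjm : j < pvPer P n u := by omega
      set x : Nat := (pvF P n)^[j] u with hx
      have hxn : x < n := pvF_iterate_lt P n hbnd u hu j
      rw [solveWalkA, if_pos (by rw [PySem.List.pyGetD_natCast]; exact hfresh j le_rfl hjm)]
      have hsetD : PySem.List.pySetD vis ((x : Nat) : Int) 1 = vis.set x 1 :=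
        PySem.List.pySetD_natCast vis x 1
      have hS : PySem.List.pyGetD S ((x : Nat) : Int) ' ' = S.getD x ' ' :=
        PySem.List.pyGetD_natCast S x ' '
      have hP : PySem.List.pyGetD P ((x : Nat) : Int) 0 - 1 = (((pvF P n)^[j+1] u : Nat) : Int) := by
        rw [PySem.List.pyGetD_natCast]
        have hb := hbnd x hxn
        rw [Function.iterate_succ_apply', ← hx]
        unfold pvF
        rw [if_pos hxn]
        omega
      rw [hsetD, hS, hP]
      rw [ih (j + 1) (vis.set x 1) (path ++ [((x : Nat) : Int)])
        (cnt + (if S.getD x ' ' = '0' then 1 else 0)) fl (by omega) (by omega)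
        (by simpa using hlen) ?fresh ?stop]
      case fresh =>
        intro k hk1 hk2
        rw [getD_set_eq_ite vis x _ 1 0 (by omega) (by rw [hlen]; exact pvF_iterate_lt P n hbnd u hu k)]
        rw [if_neg (fun h => pvIter_distinct P n hbnd hinj u j k (by omega) hk2 (by rw [← hx, h]))]
        exact hfresh k (by omega) hk2
      case stop =>
        intro _
        by_cases hj0 : j = 0
        · rw [getD_set_eq_ite vis x u 1 0 (by omega) (by omega)]
          rw [if_pos (by rw [hx, hj0]; rfl)]
          omega
        · rw [getD_set_eq_ite vis x u 1 0 (by omega) (by omega)]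
          rw [if_neg (fun h => pvIter_distinct P n hbnd hinj u 0 j (by omega) hjm (by rw [← hx, ← h]; rfl))]
          exact hstop (by omega)
      have hr : List.range' j (pvPer P n u - j) = j :: List.range' (j + 1) (pvPer P n u - (j + 1)) := by
        rw [show pvPer P n u - j = (pvPer P n u - (j + 1)) + 1 from by omega, List.range'_succ]
      rw [hr]
      simp only [List.map_cons, Prod.mk.injEq]
      refine ⟨rfl, ?_, ?_⟩
      · rw [← hx, List.append_assoc]
        rfl
      · rw [Finset.sum_eq_sum_Ico_succ_bot hjm]
        unfold pvZ
        rw [← hx]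
        ring

-- the writeback over a path of casts is pvSetAll
lemma foldl_pySetD_casts (x : Int) (ks : List Nat) (r : List Int) :
    (ks.map (fun k => ((k : Nat) : Int))).foldl (fun r v => PySem.List.pySetD r v x) r
      = pvSetAll x ks r := by
  induction ks generalizing r with
  | nil => rfl
  | cons k ks ih =>
      show (ks.map _).foldl _ (PySem.List.pySetD r ((k : Nat) : Int) x) = _
      rw [PySem.List.pySetD_natCast]
      exact ih _

-- membership in the marked segment is membership in the cycle
lemma seg_mem_iff (P : List Int) (n u i : Nat) :
    (i ∈ (List.range' 0 (pvPer P n u - 0)).map (fun k => (pvF P n)^[k] u)) ↔ i ∈ pvOrb P n u := by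
  rw [pvOrb_mem_iff]
  simp only [Nat.sub_zero, List.mem_map, List.mem_range']
  constructor
  · rintro ⟨k, hk, rfl⟩
    exact ⟨k, by omega, rfl⟩
  · rintro ⟨k, hk, rfl⟩
    exact ⟨k, by simp; omega, rfl⟩

-- the outer loop invariant: after the first j starts, vis is forward-closed, covers
-- the first j nodes, and res carries the cycle black count of every visited node
lemma outer_sim (P : List Int) (S : List Char) (n : Nat)
    (hbnd : ∀ i : Nat, i < n → 1 ≤ P.getD i 0 ∧ P.getD i 0 ≤ (n : Int))
    (hinj : ∀ i j : Nat, i < n → j < n → P.getD i 0 = P.getD j 0 → i = j) :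
    ∀ j, j ≤ n →
    ∃ vis res,
      ((List.range j).map (fun (k : Nat) => (0 : Int) + (k : Int))).foldl (fun st u =>
          let w := solveWalkA P S (n + 1) st.1 [] 0 u
          (w.1, w.2.1.foldl (fun r v => PySem.List.pySetD r v w.2.2) st.2))
        (List.replicate n 0, List.replicate n 0) = (vis, res) ∧
      vis.length = n ∧ res.length = n ∧
      (∀ i, i < n → vis.getD i 0 ≠ 0 → vis.getD (pvF P n i) 0 ≠ 0) ∧
      (∀ i, i < j → vis.getD i 0 ≠ 0) ∧
      (∀ i, i < n → vis.getD i 0 ≠ 0 → res.getD i 0 = pvW P S n i) := by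
  intro j
  induction j with
  | zero =>
      intro _
      refine ⟨List.replicate n 0, List.replicate n 0, by simp, by simp, by simp, ?_, by omega, ?_⟩
      · intro i hi h
        exact absurd (List.getD_replicate _ (by omega)) h
      · intro i hi h
        exact absurd (List.getD_replicate _ (by omega)) h
  | succ j ihj =>
      intro hj1
      have hjn : j < n := by omega
      obtain ⟨vis, res, hf, hlv, hlr, hcl, hproc, hres⟩ := ihj (by omega)
      have hsplit : (List.range (j + 1)).map (fun (k : Nat) => (0 : Int) + (k : Int))
          = (List.range j).map (fun (k : Nat) => (0 : Int) + (k : Int)) ++ [(0 : Int) + (j : Int)] := by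
        rw [List.range_succ, List.map_append]
        rfl
      rw [hsplit]
      by_cases hvj : vis.getD j 0 ≠ 0
      · -- start already visited: the walk stops immediately and nothing changes
        refine ⟨vis, res, ?_, hlv, hlr, hcl, ?_, hres⟩
        · rw [List.foldl_append, hf]
          show (_, _) = _
          rw [solveWalkA, if_neg (by simp only [zero_add]; rw [PySem.List.pyGetD_natCast]; exact hvj)]
          rfl
        · intro i hi
          rcases Nat.lt_succ_iff_lt_or_eq.mp hi with h | h
          · exact hproc i h
          · subst h; exact hvj
      · -- fresh start: one walk marks the whole cycle and writes its count
        rw [not_ne_iff] at hvj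
        obtain ⟨hp, hper, hpn⟩ := pvPer_spec P n hbnd hinj j hjn
        have hfresh := orbit_unvisited P n hbnd hinj vis hcl j hjn hvj
        have hwalk := walkA_spec P S n hbnd hinj j hjn (pvPer P n j) 0 vis [] 0 (n + 1)
          (by omega) (by omega) hlv (fun k _ => hfresh k) (by omega)
        set segN : List Nat := (List.range' 0 (pvPer P n j - 0)).map (fun k => (pvF P n)^[k] j)
          with hsegN
        have hsegb : ∀ k ∈ segN, k < n := by
          intro k hk
          rw [hsegN] at hk
          obtain ⟨a, _, rfl⟩ := List.mem_map.mp hk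
          exact pvF_iterate_lt P n hbnd j hjn a
        set cnt : Int := ∑ k ∈ Finset.Ico 0 (pvPer P n j), pvZ S ((pvF P n)^[k] j) with hcnt
        have hcntW : cnt = pvW P S n j := by
          rw [hcnt, pvW_eq_range_sum P S n hbnd hinj j hjn, Finset.range_eq_Ico]
        refine ⟨pvSetAll 1 segN vis, pvSetAll cnt segN res, ?_, ?_, ?_, ?_, ?_, ?_⟩
        · rw [List.foldl_append, hf]
          show (_, _) = _
          simp only [zero_add] at hwalk ⊢
          rw [Function.iterate_zero_apply] at hwalk
          rw [hwalk]
          have hmm : (List.range' 0 (pvPer P n j - 0)).map (fun k => (((pvF P n)^[k] j : Nat) : Int))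
              = segN.map (fun k => ((k : Nat) : Int)) := by
            rw [hsegN, List.map_map]
            rfl
          show (pvSetAll 1 segN vis,
            (([] : List Int) ++ (List.range' 0 (pvPer P n j - 0)).map
              (fun k => (((pvF P n)^[k] j : Nat) : Int))).foldl
              (fun r v => PySem.List.pySetD r v cnt) res) = (pvSetAll 1 segN vis, pvSetAll cnt segN res)
          rw [List.nil_append, hmm, foldl_pySetD_casts]
        · rw [pvSetAll_length, hlv]
        · rw [pvSetAll_length, hlr]
        · intro i hi h
          have hfi : pvF P n i < n := pvF_lt P n hbnd i hi
          rw [pvSetAll_getD 1 segN vis i (by omega) (by rw [hlv]; exact hsegb)] at h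
          rw [pvSetAll_getD 1 segN vis (pvF P n i) (by omega) (by rw [hlv]; exact hsegb)]
          by_cases hmem : i ∈ segN
          · have h1 : i ∈ pvOrb P n j := (seg_mem_iff P n j i).mp hmem
            have h2 : pvF P n i ∈ pvOrb P n j := by
              rw [← pvOrb_eq_of_mem P n hbnd hinj j i hjn h1,
                ← pvOrb_succ P n hbnd hinj i hi]
              exact pvOrb_self_mem P n hbnd hinj (pvF P n i) hfi
            rw [if_pos ((seg_mem_iff P n j (pvF P n i)).mpr h2)]
            omega
          · rw [if_neg hmem] at h
            by_cases hmem2 : pvF P n i ∈ segN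
            · rw [if_pos hmem2]; omega
            · rw [if_neg hmem2]; exact hcl i hi h
        · intro i hi
          rw [pvSetAll_getD 1 segN vis i (by omega) (by rw [hlv]; exact hsegb)]
          rcases Nat.lt_succ_iff_lt_or_eq.mp hi with h | h
          · by_cases hmem : i ∈ segN
            · rw [if_pos hmem]; omega
            · rw [if_neg hmem]; exact hproc i h
          · subst h
            rw [if_pos ((seg_mem_iff P n i i).mpr (pvOrb_self_mem P n hbnd hinj i hjn))]
            omega
        · intro i hi h
          rw [pvSetAll_getD 1 segN vis i (by omega) (by rw [hlv]; exact hsegb)] at h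
          rw [pvSetAll_getD cnt segN res i (by omega) (by rw [hlr]; exact hsegb)]
          by_cases hmem : i ∈ segN
          · rw [if_pos hmem, hcntW]
            have h1 : i ∈ pvOrb P n j := (seg_mem_iff P n j i).mp hmem
            unfold pvW
            rw [pvOrb_eq_of_mem P n hbnd hinj j i hjn h1]
          · rw [if_neg hmem] at h
            rw [if_neg hmem]
            exact hres i hi h

-- ===== VERDICT (by name: the statement is the Claim_ definition above) =====
theorem solve_spec : Claim_equal_solve := by
  intro N P S hDom hPre
  show solve N P S = solve_alt N P S
  rcases hPre with hneg | ⟨hN, hPl, hSl, hPb, hPnd⟩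
  · unfold solve solve_alt
    rw [PySem.List.pyRange_one_eq_nil (by omega)]
    simp [show N.toNat = 0 from by omega]
  unfold solve solve_alt
  set n := N.toNat with hn
  have hNn : (n : Int) = N := by omega
  have hbnd : ∀ i : Nat, i < n → 1 ≤ P.getD i 0 ∧ P.getD i 0 ≤ (n : Int) := by
    intro i hi
    have hiP : i < P.length := by omega
    have hmem : P[i] ∈ P.take n := by
      have h1 : (P.take n)[i]'(by simp; omega) = P[i] := List.getElem_take
      rw [← h1]
      exact List.getElem_mem _
    have := hPb _ hmem
    rw [List.getD_eq_getElem _ _ hiP]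
    omega
  have hinj : ∀ i j : Nat, i < n → j < n → P.getD i 0 = P.getD j 0 → i = j := by
    intro i j hi hj hij
    have hiP : i < P.length := by omega
    have hjP : j < P.length := by omega
    have h1 : (P.take n)[i]'(by simp; omega) = P[i] := List.getElem_take
    have h2 : (P.take n)[j]'(by simp; omega) = P[j] := List.getElem_take
    rw [List.getD_eq_getElem _ _ hiP, List.getD_eq_getElem _ _ hjP, ← h1, ← h2] at hij
    exact (List.Nodup.getElem_inj_iff hPnd).mp hij
  obtain ⟨vis, res, hf, hlv, hlr, hcl, hproc, hres⟩ := outer_sim P S.toList n hbnd hinj n le_rfl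
  have hrange : PySem.List.pyRange 0 N 1
      = (List.range n).map (fun (k : Nat) => (0 : Int) + (k : Int)) := by
    have h0 : (N - 0).toNat = n := by omega
    rw [PySem.List.pyRange_one, h0]
  rw [hrange, hf]
  show res = (List.map _ (List.range n)).map _
  rw [List.map_map]
  apply List.ext_getElem (by simp [hlr])
  intro i h1 h2
  have hin : i < n := by simpa [hlr] using h1
  rw [List.getElem_map, List.getElem_range]
  show res[i] = solveWalkB P S.toList ((0 : Int) + (i : Int)) (n + 1)
    (if PySem.List.pyGetD S.toList ((0 : Int) + (i : Int)) ' ' = '0' then 1 else 0)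
    (PySem.List.pyGetD P ((0 : Int) + (i : Int)) 0 - 1)
  simp only [zero_add]
  have hSg : (if PySem.List.pyGetD S.toList ((i : Nat) : Int) ' ' = '0' then (1 : Int) else 0)
      = pvZ S.toList i := by
    rw [PySem.List.pyGetD_natCast]
    rfl
  rw [hSg, solve_alt_elem P S.toList n hbnd hinj i hin]
  rw [← hres i hin (hproc i hin), List.getD_eq_getElem _ _ (by omega)]
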